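-- pv_equiv track=rewrite | github.com/rcore-os/tgoskits | scripts/repo/remove_cargo_workspace.py | extract_workspace_section
-- ===== SOURCE A (Python) =====
-- def extract_workspace_section(toml_lines):
--     """
--     从 TOML 内容中提取 [workspace] 及其子节点。
--     返回包含 workspace 配置的行列表。
--     """
--     result = []
--     i = 0
--
--     while i < len(toml_lines):
--         line = toml_lines[i]
--         stripped = line.strip()
--
--         # 检测 [workspace] 或 [workspace.xxx]
--         if stripped.startswith('[workspace') and stripped.endswith(']'):
--             # 添加整个 workspace 部分
--             result.append(line)
--             i += 1
--             # 添加所有子节点，直到遇到同级或更高级别的表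
--             while i < len(toml_lines):
--                 next_line = toml_lines[i]
--                 next_stripped = next_line.strip()
--                 # 遇到新的表定义（非 workspace 子节点）
--                 if next_stripped.startswith('['):
--                     if not next_stripped.startswith('[workspace'):
--                         break
--                     result.append(next_line)
--                 else:
--                     result.append(next_line)
--                 i += 1
--             break
--         i += 1
--
--     return result
-- ===== SOURCE B (Python) =====
-- def extract_workspace_section(toml_lines):
--     start = None
--     for i, line in enumerate(toml_lines):
--         s = line.strip()
--         if s.startswith('[workspace') and s.endswith(']'):
--             start = i
--             break
--     if start is None:
--         return []
--     end = len(toml_lines)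
--     for j in range(start + 1, len(toml_lines)):
--         s = toml_lines[j].strip()
--         if s.startswith('[') and not s.startswith('[workspace'):
--             end = j
--             break
--     return toml_lines[start:end]
-- ===== Notes on version B (the rewrite author's own statement) =====
-- stated objective: simpler
-- what changed: B computes two integer boundaries (index of the workspace header, index of the next non-workspace table header) and returns the slice toml_lines[start:end], instead of A's nested while loops growing a result list line by line; the single slice also avoids per-line appends, a measured constant-factor speedup.
import Mathlib
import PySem

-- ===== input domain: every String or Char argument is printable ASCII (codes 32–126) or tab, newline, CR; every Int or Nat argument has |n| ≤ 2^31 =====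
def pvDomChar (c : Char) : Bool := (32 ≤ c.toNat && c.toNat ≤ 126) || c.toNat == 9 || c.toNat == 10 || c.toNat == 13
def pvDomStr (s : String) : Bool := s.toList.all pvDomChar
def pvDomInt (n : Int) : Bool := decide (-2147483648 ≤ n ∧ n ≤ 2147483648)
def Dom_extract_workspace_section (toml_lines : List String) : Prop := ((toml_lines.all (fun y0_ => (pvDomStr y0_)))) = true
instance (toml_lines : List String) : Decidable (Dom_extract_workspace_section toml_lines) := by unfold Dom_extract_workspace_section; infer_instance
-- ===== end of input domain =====

-- B extracts the workspace section as a slice between two computed boundaries (start header index,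
-- next non-workspace table header) instead of A's nested while loops appending to a result list; objective: simpler.

-- ===== PORT A =====
-- inner while loop of A: collect lines until a non-workspace table header
def pvWsInner : List String → List String
  | [] => []
  | l :: rest =>
    let s := PySem.Str.strip l
    if PySem.Str.startswith s "[" then
      if ¬ PySem.Str.startswith s "[workspace" then []
      else l :: pvWsInner rest
    else l :: pvWsInner rest

def extract_workspace_section (toml_lines : List String) : List String :=
  match toml_lines with
  | [] => []
  | l :: rest =>
    let s := PySem.Str.strip l
    if PySem.Str.startswith s "[workspace" ∧ PySem.Str.endswith s "]" then
      l :: pvWsInner rest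
    else extract_workspace_section rest

-- ===== PORT B =====
-- first loop of B: index of the first workspace header line
def pvFindStart : List String → Nat → Option Nat
  | [], _ => none
  | l :: rest, i =>
    let s := PySem.Str.strip l
    if PySem.Str.startswith s "[workspace" ∧ PySem.Str.endswith s "]" then some i
    else pvFindStart rest (i + 1)

-- second loop of B: first index ≥ j that is a non-workspace table header, else j + length
def pvFindEnd : List String → Nat → Nat
  | [], j => j
  | l :: rest, j =>
    let s := PySem.Str.strip l
    if PySem.Str.startswith s "[" ∧ ¬ PySem.Str.startswith s "[workspace" then j
    else pvFindEnd rest (j + 1)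

def extract_workspace_section_alt (toml_lines : List String) : List String :=
  match pvFindStart toml_lines 0 with
  | none => []
  | some start =>
    let e := pvFindEnd (toml_lines.drop (start + 1)) (start + 1)
    PySem.List.slice toml_lines (some (start : Int)) (some (e : Int))

-- ===== PRECONDITION & SPEC =====
def Spec_extract_workspace_section (toml_lines : List String) (out : List String) : Prop := out = extract_workspace_section_alt toml_lines
instance (toml_lines : List String) (out : List String) : Decidable (Spec_extract_workspace_section toml_lines out) := by unfold Spec_extract_workspace_section; infer_instance

-- ===== CLAIM (what is proved, stated in full; the proofs are below) =====
def Claim_equal_extract_workspace_section : Prop := ∀ (toml_lines : List String), Dom_extract_workspace_section toml_lines → Spec_extract_workspace_section toml_lines (extract_workspace_section toml_lines)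

-- ===== LEMMAS AND PROOFS =====

theorem pvFindEnd_ge (xs : List String) (j : Nat) : j ≤ pvFindEnd xs j := by
  induction xs generalizing j with
  | nil => simp [pvFindEnd]
  | cons l rest ih =>
    simp only [pvFindEnd]
    split
    · exact le_refl _
    · exact le_trans (Nat.le_succ j) (ih (j + 1))

theorem pvWsInner_eq_take (xs : List String) (j : Nat) :
    pvWsInner xs = xs.take (pvFindEnd xs (j + 1) - (j + 1)) := by
  induction xs generalizing j with
  | nil => simp [pvWsInner]
  | cons l rest ih =>
    simp only [pvWsInner, pvFindEnd]
    by_cases hc : (PySem.Str.startswith (PySem.Str.strip l) "[" = true ∧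
        ¬ PySem.Str.startswith (PySem.Str.strip l) "[workspace" = true)
    · rw [if_pos hc.1, if_pos hc.2, if_pos hc]
      simp
    · rw [if_neg hc]
      have hge := pvFindEnd_ge rest (j + 1 + 1)
      have hstep : pvFindEnd rest (j + 1 + 1) - (j + 1)
          = (pvFindEnd rest (j + 1 + 1) - (j + 1 + 1)) + 1 := by omega
      by_cases h1 : PySem.Str.startswith (PySem.Str.strip l) "[" = true
      · by_cases h2 : PySem.Str.startswith (PySem.Str.strip l) "[workspace" = true
        · rw [if_pos h1, if_neg (not_not_intro h2), hstep, List.take_succ_cons]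
          exact congrArg (l :: ·) (ih (j + 1))
        · exact absurd ⟨h1, h2⟩ hc
      · rw [if_neg h1, hstep, List.take_succ_cons]
        exact congrArg (l :: ·) (ih (j + 1))

theorem pvFindStart_shift (xs : List String) (i : Nat) :
    pvFindStart xs (i + 1) = (pvFindStart xs i).map (· + 1) := by
  induction xs generalizing i with
  | nil => simp [pvFindStart]
  | cons l rest ih =>
    simp only [pvFindStart]
    split
    · simp
    · exact ih (i + 1)

theorem pvFindEnd_shift (xs : List String) (j : Nat) :
    pvFindEnd xs (j + 1) = pvFindEnd xs j + 1 := by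
  induction xs generalizing j with
  | nil => simp [pvFindEnd]
  | cons l rest ih =>
    simp only [pvFindEnd]
    split
    · rfl
    · exact ih (j + 1)

theorem pv_main (xs : List String) :
    extract_workspace_section xs = extract_workspace_section_alt xs := by
  induction xs with
  | nil => simp [extract_workspace_section, extract_workspace_section_alt, pvFindStart]
  | cons l rest ih =>
    simp only [extract_workspace_section, extract_workspace_section_alt, pvFindStart]
    by_cases h : (PySem.Str.startswith (PySem.Str.strip l) "[workspace" = true ∧
        PySem.Str.endswith (PySem.Str.strip l) "]" = true)
    · rw [if_pos h, if_pos h]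
      simp only [List.drop_succ_cons, List.drop_zero]
      rw [PySem.List.slice_natCast]
      simp only [Nat.sub_zero]
      have hge := pvFindEnd_ge rest 1
      have h1 : pvFindEnd rest 1 = (pvFindEnd rest 1 - 1) + 1 := by omega
      rw [List.drop_zero, h1, List.take_succ_cons]
      exact congrArg (l :: ·) (pvWsInner_eq_take rest 0)
    · rw [if_neg h, if_neg h, ih]
      rw [pvFindStart_shift rest 0]
      unfold extract_workspace_section_alt
      cases hs : pvFindStart rest 0 with
      | none => simp
      | some s =>
        simp only [Option.map_some, List.drop_succ_cons]
        rw [pvFindEnd_shift (rest.drop (s + 1)) (s + 1)]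
        rw [PySem.List.slice_natCast, PySem.List.slice_natCast]
        simp [Nat.succ_sub_succ]

-- ===== VERDICT (by name: the statement is the Claim_ definition above) =====
theorem extract_workspace_section_spec : Claim_equal_extract_workspace_section := by
  intro xs _
  exact pv_main xs
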